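-- pv_equiv track=rewrite | github.com/qt-creator/qt-creator | src/libs/qmljs/parser/changeLicense.py | detectLicense
-- ===== SOURCE A (Python) =====
-- def detectLicense(fileContent: list[str]) -> tuple[int, int]:
--     for i, line in enumerate(fileContent):
--         if fileContent[i].startswith('//'):
--             """
--             new license style (commented with //): return first noncomment-line
--             after commented license
--             """
--             for j, line in enumerate(fileContent[i:]):
--                 if not line.startswith('//'):
--                     return (i, i + j)
--             return (i, len(fileContent))
--
--         if fileContent[i].startswith('/*'):
--             """
--             old license style (commented as /*block*/): return line after the
--             block-comment
--             """
--             for j, line in enumerate(fileContent[i:]):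
--                 if line.endswith('*/\n'):
--                     return (i, i + j + 1)
--             raise ValueError("Encountered EOF while in the license comment")
--         # else case: probably the generated codes "#line ..."
--
--     raise ValueError("Encountered EOF without finding any license")
-- ===== SOURCE B (Python) =====
-- def detectLicense(fileContent: list[str]) -> tuple[int, int]:
--     NONE, SLASH, BLOCK = 0, 1, 2
--     state = NONE
--     start = 0
--     for i, line in enumerate(fileContent):
--         if state == NONE:
--             if line.startswith('//'):
--                 state, start = SLASH, i
--             elif line.startswith('/*'):
--                 if line.endswith('*/\n'):
--                     return (i, i + 1)
--                 state, start = BLOCK, i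
--         elif state == SLASH:
--             if not line.startswith('//'):
--                 return (start, i)
--         else:
--             if line.endswith('*/\n'):
--                 return (start, i + 1)
--     if state == NONE:
--         raise ValueError("Encountered EOF without finding any license")
--     if state == SLASH:
--         return (start, len(fileContent))
--     raise ValueError("Encountered EOF while in the license comment")
-- ===== Notes on version B (the rewrite author's own statement) =====
-- stated objective: alternative
-- what changed: Replaced A's outer scan with two nested inner scans by a single linear pass driven by a NONE/SLASH/BLOCK state variable and a recorded start index.
import Mathlib
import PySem

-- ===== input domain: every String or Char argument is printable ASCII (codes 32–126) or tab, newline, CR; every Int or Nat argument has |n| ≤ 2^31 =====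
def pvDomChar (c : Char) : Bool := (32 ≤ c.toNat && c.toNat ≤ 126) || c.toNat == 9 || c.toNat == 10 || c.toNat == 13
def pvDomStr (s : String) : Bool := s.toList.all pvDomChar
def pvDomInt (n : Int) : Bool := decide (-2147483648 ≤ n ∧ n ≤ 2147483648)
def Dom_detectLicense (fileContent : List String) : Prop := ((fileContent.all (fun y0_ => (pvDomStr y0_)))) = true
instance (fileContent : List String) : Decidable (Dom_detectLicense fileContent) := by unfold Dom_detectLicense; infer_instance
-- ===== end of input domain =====

-- B is the same license-boundary detection as a single linear pass with a NONE/SLASH/BLOCK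
-- state variable instead of A's outer scan plus nested inner scans (objective: alternative).

-- ===== PORT A =====
-- inner loop `for j, line in enumerate(fileContent[i:]): if not line.startswith('//') ...`
def pvASlash (lines : List String) (i : Int) (j : Int) : Int × Int :=
  match lines with
  | [] => (i, i + j)                        -- inner loop exhausted: return (i, len(fileContent))
  | line :: rest =>
    if ¬ (PySem.Str.startswith line "//") then (i, i + j)
    else pvASlash rest i (j + 1)

-- inner loop `for j, line in enumerate(fileContent[i:]): if line.endswith('*/\n') ...`
def pvABlock (lines : List String) (i : Int) (j : Int) : Int × Int :=
  match lines with
  | [] => (0, 0)                            -- raise ValueError("… EOF while in the license comment")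
  | line :: rest =>
    if PySem.Str.endswith line "*/\n" then (i, i + j + 1)
    else pvABlock rest i (j + 1)

-- outer loop `for i, line in enumerate(fileContent)`
def pvAGo (lines : List String) (i : Int) : Int × Int :=
  match lines with
  | [] => (0, 0)                            -- raise ValueError("… EOF without finding any license")
  | line :: rest =>
    if PySem.Str.startswith line "//" then pvASlash (line :: rest) i 0
    else if PySem.Str.startswith line "/*" then pvABlock (line :: rest) i 0
    else pvAGo rest (i + 1)

def detectLicense (fileContent : List String) : Int × Int :=
  pvAGo fileContent 0

-- ===== PORT B =====
-- single pass: state 0 = NONE, 1 = SLASH, 2 = BLOCK; `start` is the recorded start index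
def pvBGo (lines : List String) (i : Int) (state : Int) (start : Int) : Int × Int :=
  match lines with
  | [] =>
    if state = 1 then (start, i)            -- SLASH at EOF: (start, len(fileContent))
    else (0, 0)                             -- NONE / BLOCK at EOF: raise ValueError
  | line :: rest =>
    if state = 0 then
      if PySem.Str.startswith line "//" then pvBGo rest (i + 1) 1 i
      else if PySem.Str.startswith line "/*" then
        if PySem.Str.endswith line "*/\n" then (i, i + 1)
        else pvBGo rest (i + 1) 2 i
      else pvBGo rest (i + 1) 0 start
    else if state = 1 then
      if ¬ (PySem.Str.startswith line "//") then (start, i)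
      else pvBGo rest (i + 1) 1 start
    else
      if PySem.Str.endswith line "*/\n" then (start, i + 1)
      else pvBGo rest (i + 1) 2 start

def detectLicense_alt (fileContent : List String) : Int × Int :=
  pvBGo fileContent 0 0 0

-- ===== PRECONDITION & SPEC =====
-- Pre_ excludes exactly the inputs on which A raises ValueError: files with no line
-- starting with '//' or '/*', and files whose first such line opens a '/*' block
-- that no later line closes with '*/\n'.
def Pre_detectLicense (fileContent : List String) : Prop :=
  ∃ i, i < fileContent.length ∧
    ((∀ k, k < i → ¬ (PySem.Str.startswith (fileContent.getD k "") "//" = true) ∧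
                   ¬ (PySem.Str.startswith (fileContent.getD k "") "/*" = true)) ∧
     (PySem.Str.startswith (fileContent.getD i "") "//" = true ∨
       (PySem.Str.startswith (fileContent.getD i "") "/*" = true ∧
         ∃ j, j < fileContent.length ∧
           (i ≤ j ∧ PySem.Str.endswith (fileContent.getD j "") "*/\n" = true))))
instance (fileContent : List String) : Decidable (Pre_detectLicense fileContent) := by
  unfold Pre_detectLicense; infer_instance

def pvWitness_detectLicense : List String := ["// a\n", "x\n"]

def Spec_detectLicense (fileContent : List String) (out : Int × Int) : Prop := out = detectLicense_alt fileContent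
instance (fileContent : List String) (out : Int × Int) : Decidable (Spec_detectLicense fileContent out) := by unfold Spec_detectLicense; infer_instance

-- ===== CLAIM (what is proved, stated in full; the proofs are below) =====
def Claim_equal_detectLicense : Prop := ∀ (fileContent : List String), Dom_detectLicense fileContent → Pre_detectLicense fileContent → Spec_detectLicense fileContent (detectLicense fileContent)

-- ===== LEMMAS AND PROOFS =====

theorem pvSlash_eq (lines : List String) (start j : Int) :
    pvASlash lines start j = pvBGo lines (start + j) 1 start := by
  induction lines generalizing j with
  | nil => simp [pvASlash, pvBGo]
  | cons line rest ih =>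
    have e : start + j + 1 = start + (j + 1) := by ring
    cases h : PySem.Str.startswith line "//" with
    | false => simp at h; simp [pvASlash, pvBGo, h]
    | true => simp at h; simp [pvASlash, pvBGo, h, e, ih]

theorem pvBlock_eq (lines : List String) (start j : Int) :
    pvABlock lines start j = pvBGo lines (start + j) 2 start := by
  induction lines generalizing j with
  | nil => simp [pvABlock, pvBGo]
  | cons line rest ih =>
    have e : start + j + 1 = start + (j + 1) := by ring
    cases h : PySem.Str.endswith line "*/\n" with
    | true => simp at h; simp [pvABlock, pvBGo, h, e]
    | false => simp at h; simp [pvABlock, pvBGo, h, e, ih]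

theorem pvGo_eq (lines : List String) (i start : Int) :
    pvAGo lines i = pvBGo lines i 0 start := by
  induction lines generalizing i start with
  | nil => simp [pvAGo, pvBGo]
  | cons line rest ih =>
    cases h1 : PySem.Str.startswith line "//" with
    | true =>
      simp at h1
      simp [pvAGo, pvBGo, pvASlash, h1, pvSlash_eq rest i 1]
    | false =>
      simp at h1
      cases h2 : PySem.Str.startswith line "/*" with
      | true =>
        simp at h2
        cases h3 : PySem.Str.endswith line "*/\n" with
        | true => simp at h3; simp [pvAGo, pvBGo, pvABlock, h1, h2, h3]
        | false => simp at h3; simp [pvAGo, pvBGo, pvABlock, h1, h2, h3, pvBlock_eq rest i 1]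
      | false =>
        simp at h2
        simp [pvAGo, pvBGo, h1, h2]
        exact ih _ _

-- ===== VERDICT (by name: the statement is the Claim_ definition above) =====
theorem detectLicense_spec : Claim_equal_detectLicense := by
  intro fileContent _ _
  unfold Spec_detectLicense detectLicense detectLicense_alt
  exact pvGo_eq fileContent 0 0
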